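-- pv_equiv track=rewrite | github.com/codeshareabc/DRGCN | run/drgcn.py | get_batch_samples
-- ===== SOURCE A (Python) =====
-- def get_batch_samples(pos, bsize, test_idx):
--     batch_idx = []
--     begin = pos * bsize
--     end = pos * bsize + bsize
--     total_num = len(test_idx)
--     for i in range(begin, end):
--         idx = i % total_num
--         batch_idx.append(idx)
--
--     return batch_idx
-- ===== SOURCE B (Python) =====
-- def get_batch_samples(pos, bsize, test_idx):
--     batch_idx = []
--     remaining = bsize
--     if remaining <= 0:
--         return batch_idx
--     total_num = len(test_idx)
--     start = (pos * bsize) % total_num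
--     while remaining > 0:
--         chunk = min(remaining, total_num - start)
--         batch_idx.extend(range(start, start + chunk))
--         start = 0
--         remaining -= chunk
--     return batch_idx
-- ===== Notes on version B (the rewrite author's own statement) =====
-- stated objective: alternative
-- what changed: Replaces the per-element loop with a modulo per index by a single start modulo followed by whole range-segment extends (one segment per wrap-around); trades per-element arithmetic for bulk range construction.
import Mathlib
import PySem

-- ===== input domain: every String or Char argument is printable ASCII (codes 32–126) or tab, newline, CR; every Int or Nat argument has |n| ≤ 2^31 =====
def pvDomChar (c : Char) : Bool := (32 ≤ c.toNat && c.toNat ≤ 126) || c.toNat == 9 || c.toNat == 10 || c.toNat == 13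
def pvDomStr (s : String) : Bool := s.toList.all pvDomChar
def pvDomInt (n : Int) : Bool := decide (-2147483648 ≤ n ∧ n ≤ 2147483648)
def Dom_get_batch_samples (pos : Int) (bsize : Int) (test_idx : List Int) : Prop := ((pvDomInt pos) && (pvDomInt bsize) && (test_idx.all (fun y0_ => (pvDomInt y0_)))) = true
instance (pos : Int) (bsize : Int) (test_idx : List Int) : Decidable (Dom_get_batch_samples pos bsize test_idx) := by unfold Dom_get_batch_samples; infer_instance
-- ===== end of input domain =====

-- B replaces the per-element modulo loop by one start modulo plus whole range-segment chunks; equal on Pre_, which excludes the ZeroDivisionError case bsize > 0 ∧ test_idx = [].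


-- ===== PORT A =====
def get_batch_samples (pos : Int) (bsize : Int) (test_idx : List Int) : List Int :=
  let begin_ : Int := pos * bsize
  let end_ : Int := pos * bsize + bsize
  let total_num : Int := test_idx.length
  (PySem.List.pyRange begin_ end_ 1).foldl
    (fun batch_idx i => batch_idx ++ [PySem.Int.mod i total_num]) []

-- ===== PORT B =====
-- B's while loop; the `else []` branch is a totality guard only: it is never
-- reached on calls with 0 ≤ start < total_num (then chunk > 0 whenever remaining > 0).
def chunkLoop (total_num : Int) (start remaining : Int) : List Int :=
  if hr : 0 < remaining then
    let chunk := min remaining (total_num - start)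
    if hc : 0 < chunk then
      PySem.List.pyRange start (start + chunk) 1 ++ chunkLoop total_num 0 (remaining - chunk)
    else []
  else []
termination_by remaining.toNat
decreasing_by omega

def get_batch_samples_alt (pos : Int) (bsize : Int) (test_idx : List Int) : List Int :=
  if bsize ≤ 0 then []
  else
    let total_num : Int := test_idx.length
    chunkLoop total_num (PySem.Int.mod (pos * bsize) total_num) bsize

-- ===== PRECONDITION & SPEC =====
-- Excludes exactly the ZeroDivisionError inputs of A: bsize > 0 with an empty test_idx.
def Pre_get_batch_samples (pos : Int) (bsize : Int) (test_idx : List Int) : Prop :=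
  bsize ≤ 0 ∨ test_idx ≠ []
instance (pos : Int) (bsize : Int) (test_idx : List Int) : Decidable (Pre_get_batch_samples pos bsize test_idx) := by unfold Pre_get_batch_samples; infer_instance
def pvWitness_get_batch_samples : Int × Int × List Int := (2, 3, [10, 20])

def Spec_get_batch_samples (pos : Int) (bsize : Int) (test_idx : List Int) (out : List Int) : Prop := out = get_batch_samples_alt pos bsize test_idx
instance (pos : Int) (bsize : Int) (test_idx : List Int) (out : List Int) : Decidable (Spec_get_batch_samples pos bsize test_idx out) := by unfold Spec_get_batch_samples; infer_instance

-- ===== CLAIM (what is proved, stated in full; the proofs are below) =====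
def Claim_equal_get_batch_samples : Prop := ∀ (pos : Int) (bsize : Int) (test_idx : List Int), Dom_get_batch_samples pos bsize test_idx → Pre_get_batch_samples pos bsize test_idx → Spec_get_batch_samples pos bsize test_idx (get_batch_samples pos bsize test_idx)

-- ===== LEMMAS AND PROOFS =====

-- A's foldl-with-append is map.
theorem foldl_append_map {α β : Type} (f : α → β) :
    ∀ (l : List α) (acc : List β),
      l.foldl (fun b i => b ++ [f i]) acc = acc ++ l.map f := by
  intro l
  induction l with
  | nil => simp
  | cons x xs ih => intro acc; simp [List.foldl, ih]

-- One non-wrapping segment: mapping (· % n) over [c, c+k) shifts it to [c%n, c%n+k).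
theorem map_mod_segment (n : Int) (hn : 0 < n) (c : Int) :
    ∀ (k : Int), 0 ≤ k → PySem.Int.mod c n + k ≤ n →
      (PySem.List.pyRange c (c + k) 1).map (fun i => PySem.Int.mod i n)
        = PySem.List.pyRange (PySem.Int.mod c n) (PySem.Int.mod c n + k) 1 := by
  intro k hk0
  induction k, hk0 using Int.le_induction with
  | base =>
    intro _
    simp [PySem.List.pyRange_one_eq_nil (by omega : c + 0 ≤ c)]
  | succ k hk ih =>
    intro hle
    have hmem : PySem.Int.mod c n = c % n := PySem.Int.mod_eq_emod_of_pos hn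
    have hmod : PySem.Int.mod (c + k) n = PySem.Int.mod c n + k := by
      have h1 : PySem.Int.mod (c + k) n = (c + k) % n := PySem.Int.mod_eq_emod_of_pos hn
      have h2 := Int.emod_nonneg c (by omega : n ≠ 0)
      have h3 := Int.emod_lt_of_pos c hn
      have hle' : c % n + (k + 1) ≤ n := by rw [← hmem]; exact hle
      have heq : c + k = (c % n + k) + n * (c / n) := by
        have := Int.emod_add_mul_ediv c n; omega
      rw [h1, hmem, heq, Int.add_mul_emod_self_left,
        Int.emod_eq_of_lt (by omega) (by omega)]
    have e1 : c + (k + 1) = (c + k) + 1 := by ring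
    have e2 : PySem.Int.mod c n + (k + 1) = (PySem.Int.mod c n + k) + 1 := by ring
    rw [e1, e2,
      PySem.List.pyRange_one_succ_right (by omega : c ≤ c + k),
      PySem.List.pyRange_one_succ_right (by
        have := Int.emod_nonneg c (by omega : n ≠ 0)
        rw [hmem]; omega),
      List.map_append, ih (by omega)]
    simp [hmod]

-- Main invariant: chunkLoop started at c % n reproduces the mapped range of length rem.
theorem chunkLoop_eq_map (n : Int) (hn : 0 < n) :
    ∀ (fuel : Nat) (rem c : Int), 0 ≤ rem → rem.toNat ≤ fuel →
      (PySem.List.pyRange c (c + rem) 1).map (fun i => PySem.Int.mod i n)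
        = chunkLoop n (PySem.Int.mod c n) rem := by
  intro fuel
  induction fuel with
  | zero =>
    intro rem c h0 hf
    have : rem = 0 := by omega
    subst this
    rw [chunkLoop.eq_def]
    simp [PySem.List.pyRange_one_eq_nil (by omega : c + 0 ≤ c)]
  | succ f ih =>
    intro rem c h0 hf
    by_cases hr : 0 < rem
    · have hmem : PySem.Int.mod c n = c % n := PySem.Int.mod_eq_emod_of_pos hn
      have hs0 : 0 ≤ PySem.Int.mod c n := by
        rw [hmem]; exact Int.emod_nonneg c (by omega)
      have hsn : PySem.Int.mod c n < n := by
        rw [hmem]; exact Int.emod_lt_of_pos c hn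
      set s := PySem.Int.mod c n with hs
      have hchunk : 0 < min rem (n - s) := by omega
      rw [chunkLoop.eq_def]
      simp only [hr, hchunk, dif_pos]
      set chunk := min rem (n - s) with hchdef
      rw [PySem.List.pyRange_one_append c (c + chunk) (c + rem) (by omega) (by omega),
        List.map_append,
        map_mod_segment n hn c chunk (by omega) (by omega)]
      congr 1
      by_cases hcr : chunk = rem
      · rw [hcr]
        rw [chunkLoop.eq_def]
        simp [PySem.List.pyRange_one_eq_nil (by omega : c + rem ≤ c + rem)]
      · -- chunk = n - s, the next wrap starts at 0
        have hce : chunk = n - s := by omega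
        have hmod0 : PySem.Int.mod (c + chunk) n = 0 := by
          rw [PySem.Int.mod_eq_emod_of_pos hn]
          have h4 := Int.emod_emod_of_dvd (c + chunk) (dvd_refl n)
          have h2 := Int.emod_nonneg (c + chunk) (by omega : n ≠ 0)
          have h3 := Int.emod_lt_of_pos (c + chunk) hn
          have heq : c + chunk = (c % n + chunk) + n * (c / n) := by
            have := Int.emod_add_mul_ediv c n; omega
          rw [heq, Int.add_mul_emod_self_left, hce, hmem]
          simp
        have := ih (rem - chunk) (c + chunk) (by omega) (by omega)
        rw [hmod0] at this
        rw [show c + rem = (c + chunk) + (rem - chunk) by ring]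
        exact this
    · have : rem = 0 := by omega
      subst this
      rw [chunkLoop.eq_def]
      simp [PySem.List.pyRange_one_eq_nil (by omega : c + 0 ≤ c)]

-- ===== VERDICT (by name: the statement is the Claim_ definition above) =====
theorem get_batch_samples_spec : Claim_equal_get_batch_samples := by
  intro pos bsize test_idx _ hpre
  unfold Spec_get_batch_samples get_batch_samples get_batch_samples_alt
  simp only []
  by_cases hb : bsize ≤ 0
  · rw [if_pos hb, PySem.List.pyRange_one_eq_nil (by omega : pos * bsize + bsize ≤ pos * bsize)]
    simp
  · rw [if_neg hb]
    have hnil : test_idx ≠ [] := by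
      rcases hpre with h | h
      · omega
      · exact h
    have hn : 0 < (test_idx.length : Int) := by
      have : test_idx.length ≠ 0 := fun h => hnil (List.eq_nil_of_length_eq_zero h)
      omega
    rw [foldl_append_map, List.nil_append]
    exact chunkLoop_eq_map (test_idx.length : Int) hn bsize.toNat bsize (pos * bsize)
      (by omega) (le_refl _)
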